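-- pv_equiv track=rewrite | github.com/iliachry/Sionna | SNN/env_gym.py | position_is_blocked
-- ===== SOURCE A (Python) =====
-- def position_is_blocked(x, y):
--
--     # Define invalid positions for receivers
--     # Buildings, space behind buildings etc.
--     # (x1, y1, x2, y2)
--     # (x1, y1) - bottom-left
--     # (x2, y2) - top-right
--     invalid_positions = [
--         (28, 50, 80, 5),
--         (28, -5, 80, -50),
--         (-20, 50, 20, 5),
--         (-20, -5, 20, -50),
--         (-80, 50, -28, 5),
--         (-80, -5, -28, -50)
--     ]
--
--     for (x1, y1, x2, y2) in invalid_positions: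
--         if x1 <= x <= x2 and y2 <= y <= y1:
--             return True
--     return False
-- ===== SOURCE B (Python) =====
-- def position_is_blocked(x, y):
--     # The six rectangles factor into y-bands |y| in [5,50] times
--     # x-intervals [28,80], [-20,20], [-80,-28] (the outer two = |x| in [28,80]).
--     return 5 <= abs(y) <= 50 and (28 <= abs(x) <= 80 or -20 <= x <= 20)
-- ===== Notes on version B (the rewrite author's own statement) =====
-- stated objective: simpler
-- what changed: Replaced the rectangle-by-rectangle scan over six (x1,y1,x2,y2) tuples with two factored range tests using abs: |y| in [5,50] and x in one of three x-intervals (the symmetric outer pair merged via |x|).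
import Mathlib
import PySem

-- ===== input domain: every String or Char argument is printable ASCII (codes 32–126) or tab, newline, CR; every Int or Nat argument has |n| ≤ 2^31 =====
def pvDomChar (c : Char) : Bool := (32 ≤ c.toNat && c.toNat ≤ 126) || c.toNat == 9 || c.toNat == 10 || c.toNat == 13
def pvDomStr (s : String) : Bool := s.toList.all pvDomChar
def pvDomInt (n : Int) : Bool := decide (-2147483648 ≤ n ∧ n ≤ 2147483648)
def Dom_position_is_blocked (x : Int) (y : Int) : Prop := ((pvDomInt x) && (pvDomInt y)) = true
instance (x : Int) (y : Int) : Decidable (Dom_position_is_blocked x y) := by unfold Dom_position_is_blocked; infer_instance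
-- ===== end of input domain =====

-- B replaces A's six-rectangle scan with two factored range tests (|y| band × x-intervals); same values everywhere.


-- ===== PORT A =====
def pvInvalidPositions : List (Int × Int × Int × Int) :=
  [(28, 50, 80, 5), (28, -5, 80, -50), (-20, 50, 20, 5),
   (-20, -5, 20, -50), (-80, 50, -28, 5), (-80, -5, -28, -50)]

-- the for-loop with early return
def pvLoopA (x : Int) (y : Int) : List (Int × Int × Int × Int) → Bool
  | [] => false
  | (x1, y1, x2, y2) :: rest =>
      if x1 ≤ x ∧ x ≤ x2 ∧ y2 ≤ y ∧ y ≤ y1 then true else pvLoopA x y rest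

def position_is_blocked (x : Int) (y : Int) : Bool :=
  pvLoopA x y pvInvalidPositions

-- ===== PORT B =====
def position_is_blocked_alt (x : Int) (y : Int) : Bool :=
  decide (5 ≤ |y| ∧ |y| ≤ 50) &&
    (decide (28 ≤ |x| ∧ |x| ≤ 80) || decide (-20 ≤ x ∧ x ≤ 20))

-- ===== PRECONDITION & SPEC =====
def Spec_position_is_blocked (x : Int) (y : Int) (out : Bool) : Prop := out = position_is_blocked_alt x y
instance (x : Int) (y : Int) (out : Bool) : Decidable (Spec_position_is_blocked x y out) := by unfold Spec_position_is_blocked; infer_instance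

-- ===== CLAIM (what is proved, stated in full; the proofs are below) =====
def Claim_equal_position_is_blocked : Prop := ∀ (x : Int) (y : Int), Dom_position_is_blocked x y → Spec_position_is_blocked x y (position_is_blocked x y)

-- ===== LEMMAS AND PROOFS =====

-- ===== VERDICT (by name: the statement is the Claim_ definition above) =====
theorem position_is_blocked_spec : Claim_equal_position_is_blocked := by
  intro x y _
  unfold Spec_position_is_blocked position_is_blocked position_is_blocked_alt pvInvalidPositions
  rw [Bool.eq_iff_iff]
  simp only [pvLoopA, Bool.if_true_left, Bool.and_eq_true, Bool.or_eq_true, decide_eq_true_eq,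
    Bool.false_eq_true, or_false, abs_le, le_abs]
  constructor
  · intro h; omega
  · rintro ⟨⟨hy1, hy2, hy3⟩, ⟨hx1, hx2, hx3⟩ | ⟨hx1, hx2⟩⟩ <;> omega
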